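-- pv_equiv track=rewrite | github.com/kevinxchan/thesis | py/mock_analysis.py | within_taxa_distance
-- ===== SOURCE A (Python) =====
-- def within_taxa_distance(query_taxa, optimal_taxa, max_dist):
-- 	query = query_taxa.split("; ")
-- 	optimal = optimal_taxa.split("; ")
-- 	distance = 0
-- 	for i in range(max(len(query), len(optimal))):
-- 		if i >= len(query) or i >= len(optimal):
-- 			distance += 1
-- 		else:
-- 			if query[i] != optimal[i]:
-- 				distance += 1
-- 	return distance <= max_dist
-- ===== SOURCE B (Python) =====
-- def within_taxa_distance(query_taxa, optimal_taxa, max_dist):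
--     def go(q, o, budget):
--         # budget = mismatches still allowed; stop early once it goes negative
--         if budget < 0:
--             return False
--         if not q:
--             return len(o) <= budget
--         if not o:
--             return len(q) <= budget
--         return go(q[1:], o[1:], budget - (q[0] != o[0]))
--     return go(query_taxa.split("; "), optimal_taxa.split("; "), max_dist)
-- ===== Notes on version B (the rewrite author's own statement) =====
-- stated objective: alternative
-- what changed: Replaces the max-length index loop that totals a distance and compares at the end by a recursion over the two lists that threads the remaining mismatch budget and returns the Bool directly, short-circuiting as soon as the budget goes negative; the tail beyond the shorter list is settled by one length comparison.
import Mathlib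
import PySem

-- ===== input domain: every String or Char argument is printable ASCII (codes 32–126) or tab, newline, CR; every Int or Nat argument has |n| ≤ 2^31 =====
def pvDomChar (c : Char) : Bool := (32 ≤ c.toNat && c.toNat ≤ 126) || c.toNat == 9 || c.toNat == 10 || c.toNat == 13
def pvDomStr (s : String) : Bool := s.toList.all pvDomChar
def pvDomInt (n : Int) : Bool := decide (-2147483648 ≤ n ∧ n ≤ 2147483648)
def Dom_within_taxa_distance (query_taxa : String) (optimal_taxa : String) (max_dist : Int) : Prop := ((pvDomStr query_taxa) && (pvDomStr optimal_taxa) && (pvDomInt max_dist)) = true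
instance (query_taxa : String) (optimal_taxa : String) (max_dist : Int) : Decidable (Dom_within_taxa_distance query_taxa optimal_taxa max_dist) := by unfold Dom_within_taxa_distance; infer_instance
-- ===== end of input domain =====

-- B replaces A's max-length index loop (which totals a distance and compares once at the end)
-- by a recursion over the two taxa lists threading the remaining mismatch budget, returning the
-- Bool directly and short-circuiting once the budget goes negative; same cost, different shape.
-- ===== PORT A =====
def within_taxa_distance (query_taxa : String) (optimal_taxa : String) (max_dist : Int) : Bool :=
  let query := (PySem.Str.split? query_taxa "; ").getD []
  let optimal := (PySem.Str.split? optimal_taxa "; ").getD []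
  let distance : Int := (PySem.List.pyRange 0 (max (query.length : Int) (optimal.length : Int)) 1).foldl
    (fun d i =>
      if i ≥ (query.length : Int) || i ≥ (optimal.length : Int) then d + 1
      else if PySem.List.pyGetD query i "" ≠ PySem.List.pyGetD optimal i "" then d + 1 else d) 0
  decide (distance ≤ max_dist)

-- ===== PORT B =====
-- Source B's inner recursion `go`: budget-threading walk over the two lists, early false exit
def pvGo : List String → List String → Int → Bool
  | q, o, b =>
    if b < 0 then false
    else match q, o with
      | [], o => decide ((o.length : Int) ≤ b)
      | q :: qs, [] => decide (((q :: qs).length : Int) ≤ b)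
      | a :: qs, c :: os => pvGo qs os (b - if a ≠ c then 1 else 0)

def within_taxa_distance_alt (query_taxa : String) (optimal_taxa : String) (max_dist : Int) : Bool :=
  pvGo ((PySem.Str.split? query_taxa "; ").getD []) ((PySem.Str.split? optimal_taxa "; ").getD []) max_dist

-- ===== PRECONDITION & SPEC =====
def Spec_within_taxa_distance (query_taxa : String) (optimal_taxa : String) (max_dist : Int) (out : Bool) : Prop := out = within_taxa_distance_alt query_taxa optimal_taxa max_dist
instance (query_taxa : String) (optimal_taxa : String) (max_dist : Int) (out : Bool) : Decidable (Spec_within_taxa_distance query_taxa optimal_taxa max_dist out) := by unfold Spec_within_taxa_distance; infer_instance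

-- ===== CLAIM (what is proved, stated in full; the proofs are below) =====
def Claim_equal_within_taxa_distance : Prop := ∀ (query_taxa : String) (optimal_taxa : String) (max_dist : Int), Dom_within_taxa_distance query_taxa optimal_taxa max_dist → Spec_within_taxa_distance query_taxa optimal_taxa max_dist (within_taxa_distance query_taxa optimal_taxa max_dist)

-- ===== LEMMAS AND PROOFS =====

-- B's budget recursion decides the closed-form distance "prefix mismatches + length gap"
theorem pvGo_eq (q : List String) : ∀ (o : List String) (b : Int),
    pvGo q o b
      = decide ((((q.zip o).countP (fun p => p.1 != p.2) : Nat) : Int)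
          + |(q.length : Int) - (o.length : Int)| ≤ b) := by
  induction q with
  | nil =>
    intro o b
    unfold pvGo
    by_cases hb : b < 0
    · simp [hb]; omega
    · simp [hb]
  | cons a qs ih =>
    intro o b
    match o with
    | [] =>
      unfold pvGo
      have h1 : |((qs.length : Int) + 1)| = (qs.length : Int) + 1 := abs_of_nonneg (by positivity)
      by_cases hb : b < 0
      · simp only [hb, if_true, List.zip_nil_right, List.countP_nil, List.length_cons,
          List.length_nil]
        rw [eq_comm, decide_eq_false_iff_not]
        push_cast
        rw [sub_zero, h1]
        omega
      · simp only [hb, if_false, List.zip_nil_right, List.countP_nil, List.length_cons,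
          List.length_nil]
        rw [decide_eq_decide]
        push_cast
        rw [sub_zero, h1]
        omega
    | c :: os =>
      unfold pvGo
      have hcnt : (0 : Int) ≤ (((qs.zip os).countP (fun p => p.1 != p.2) : Nat) : Int) :=
        Int.natCast_nonneg _
      have habs : |((qs.length : Int) + 1) - ((os.length : Int) + 1)|
          = |(qs.length : Int) - (os.length : Int)| := by ring_nf
      have habs0 : (0 : Int) ≤ |(qs.length : Int) - (os.length : Int)| := abs_nonneg _
      by_cases hb : b < 0
      · simp only [hb, if_true]
        rw [eq_comm, decide_eq_false_iff_not]
        simp only [List.zip_cons_cons, List.countP_cons, List.length_cons]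
        push_cast
        rw [habs]
        by_cases h : a = c <;> simp [h] <;> omega
      · simp only [hb, if_false]
        rw [ih os (b - if a ≠ c then 1 else 0)]
        simp only [List.zip_cons_cons, List.countP_cons, List.length_cons]
        rw [decide_eq_decide]
        push_cast
        rw [habs]
        by_cases h : a = c <;> simp [h] <;> omega

-- counting fold over the zipped pairs = countP of mismatches (used inside loop_eq)
theorem foldl_count (xs : List (String × String)) (d : Int) :
    xs.foldl (fun acc x => if x.1 = x.2 then acc else acc + 1) d
      = d + (xs.countP (fun p => p.1 != p.2) : Nat) := by
  induction xs generalizing d with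
  | nil => simp
  | cons x xs ih =>
    simp only [List.foldl_cons, List.countP_cons, ih]
    by_cases h : x.1 = x.2
    · simp [h]
    · simp [h]; ring

-- A's index loop computes the same closed form, for any lists
theorem loop_eq (query optimal : List String) :
    (PySem.List.pyRange 0 (max (query.length : Int) (optimal.length : Int)) 1).foldl
      (fun d i =>
        if i ≥ (query.length : Int) || i ≥ (optimal.length : Int) then d + 1
        else if PySem.List.pyGetD query i "" ≠ PySem.List.pyGetD optimal i "" then d + 1 else d) (0 : Int)
    = (((query.zip optimal).countP (fun p => p.1 != p.2) : Nat) : Int)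
      + |(query.length : Int) - (optimal.length : Int)| := by
  set lq : Int := (query.length : Int) with hlq
  set lo : Int := (optimal.length : Int) with hlo
  clear_value lq lo
  have hm : (0 : Int) ≤ min lq lo := by rw [hlq, hlo]; positivity
  have hM : min lq lo ≤ max lq lo := le_trans (min_le_left _ _) (le_max_left _ _)
  rw [PySem.List.pyRange_one_append 0 (min lq lo) (max lq lo) hm hM, List.foldl_append]
  have hzlen : ((query.zip optimal).length : Int) = min lq lo := by
    simp [List.length_zip, hlq, hlo, Nat.cast_min]
  have hsuf : ∀ init : Int, (PySem.List.pyRange (min lq lo) (max lq lo) 1).foldl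
      (fun d i =>
        if i ≥ lq || i ≥ lo then d + 1
        else if PySem.List.pyGetD query i "" ≠ PySem.List.pyGetD optimal i "" then d + 1 else d) init
      = init + |lq - lo| := by
    intro init
    rw [PySem.List.foldl_congr_mem (g := fun (d : Int) (_ : Int) => d + 1)]
    · rw [PySem.List.foldl_add _ (fun _ => (1 : Int)) init]
      have habs : (((max lq lo - min lq lo).toNat : Nat) : Int) = |lq - lo| := by
        rw [Int.toNat_of_nonneg (sub_nonneg.mpr hM), max_sub_min_eq_abs]
        exact abs_sub_comm lo lq
      simp [PySem.List.length_pyRange_one, habs]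
    · intro acc i hi
      rw [PySem.List.mem_pyRange_one] at hi
      have : (decide (i ≥ lq) || decide (i ≥ lo)) = true := by
        simp; omega
      rw [this]; simp
  rw [hsuf]
  have hpre : (PySem.List.pyRange 0 (min lq lo) 1).foldl
      (fun d i =>
        if i ≥ lq || i ≥ lo then d + 1
        else if PySem.List.pyGetD query i "" ≠ PySem.List.pyGetD optimal i "" then d + 1 else d) (0 : Int)
      = (((query.zip optimal).countP (fun p => p.1 != p.2) : Nat) : Int) := by
    rw [PySem.List.foldl_congr_mem
      (g := fun (d : Int) (i : Int) =>
        if (PySem.List.pyGetD (query.zip optimal) i ("", "")).1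
            = (PySem.List.pyGetD (query.zip optimal) i ("", "")).2 then d else d + 1)]
    · rw [← hzlen, PySem.List.foldl_pyRange_zero_pyGetD' (query.zip optimal) ("", "")
        (fun d p => if p.1 = p.2 then d else d + 1) 0]
      rw [foldl_count]
      simp
    · intro acc i hi
      rw [PySem.List.mem_pyRange_one] at hi
      have hiq : i < lq := lt_of_lt_of_le hi.2 (min_le_left _ _)
      have hio : i < lo := lt_of_lt_of_le hi.2 (min_le_right _ _)
      have hcond : (decide (i ≥ lq) || decide (i ≥ lo)) = false := by
        simp; omega
      rw [hcond]
      simp only [Bool.false_eq_true, if_false]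
      rw [PySem.List.pyGetD_eq_getElem query "" hi.1 (by omega),
          PySem.List.pyGetD_eq_getElem optimal "" hi.1 (by omega),
          PySem.List.pyGetD_eq_getElem (query.zip optimal) ("", "") hi.1
            (by rw [List.length_zip]; omega),
          List.getElem_zip]
      by_cases h : query[i.toNat]'(by omega) = optimal[i.toNat]'(by omega) <;> simp [h]
  rw [hpre]

-- ===== VERDICT (by name: the statement is the Claim_ definition above) =====
theorem within_taxa_distance_spec : Claim_equal_within_taxa_distance := by
  intro q o md _
  unfold Spec_within_taxa_distance within_taxa_distance within_taxa_distance_alt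
  simp only [loop_eq, pvGo_eq]
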